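-- pv_equiv track=rewrite | github.com/ggrelaxi/course3-algorythm-tasks | task25.py | TransformTransform
-- ===== SOURCE A (Python) =====
-- def TransformTransform(A, N):
--     result = []
--
--     for i in range(len(A) - 1):
--         for j in range(len(A) - i - 1):
--             k = i + j
--
--             max = A[j]
--             for m in range(k):
--                 if A[m] > max:
--                     max = A[m]
--
--             result.append(max)
--
--     secondResult = []
--
--     for g in range(len(result) - 1):
--         for x in range(len(result) - g - 1):
--             k = g + x
--
--             max = result[x]
--             for q in range(k):
--                 if result[q] > max:
--                     max = result[q]
--
--             secondResult.append(max)
--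
--     summ = 0
--     for y in range(len(secondResult)):
--         summ += secondResult[y]
--
--     return summ % 2 == 0
-- ===== SOURCE B (Python) =====
-- def TransformTransform(A, N):
--     def transform(xs):
--         # prefix maxima computed once: pm[k] = max(xs[:k]), pm[0] = None
--         pm = [None]
--         running = None
--         for v in xs:
--             running = v if running is None or v > running else running
--             pm.append(running)
--         n = len(xs)
--         out = []
--         for i in range(n - 1):
--             for j in range(n - 1 - i):
--                 p = pm[i + j]
--                 v = xs[j]
--                 out.append(p if p is not None and p > v else v)
--         return out
--     return sum(transform(transform(A))) % 2 == 0
-- ===== Notes on version B (the rewrite author's own statement) =====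
-- stated objective: faster
-- what changed: B computes the prefix maxima of each pass once in a single scan and looks them up, removing A's innermost rescan loop in both transform passes, and sums the final list directly.
import Mathlib
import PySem

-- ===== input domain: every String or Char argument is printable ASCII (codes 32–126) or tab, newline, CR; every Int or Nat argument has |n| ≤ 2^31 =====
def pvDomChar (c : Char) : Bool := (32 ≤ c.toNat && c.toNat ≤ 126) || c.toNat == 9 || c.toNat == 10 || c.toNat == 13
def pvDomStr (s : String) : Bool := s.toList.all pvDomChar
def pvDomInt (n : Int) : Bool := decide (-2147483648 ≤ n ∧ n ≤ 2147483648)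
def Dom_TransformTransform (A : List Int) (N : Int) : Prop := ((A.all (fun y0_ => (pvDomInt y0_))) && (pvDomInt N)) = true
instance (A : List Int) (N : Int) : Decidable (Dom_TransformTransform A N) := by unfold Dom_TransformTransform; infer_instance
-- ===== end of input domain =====

-- B replaces A's innermost rescan of the prefix by prefix maxima computed once per pass
-- (O(n^4) instead of O(n^6)); same return value everywhere, N is unused by both.

-- ===== PORT A =====
-- the inner 'max = A[j]; for m in range(k): …' loop (indices are always in range, so
-- getD is exact here; range(k) over Nat k is exact since k = i+j ≥ 0)
def aInnerMax (xs : List Int) (j k : Nat) : Int :=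
  (List.range k).foldl (fun mx m => if xs.getD m 0 > mx then xs.getD m 0 else mx) (xs.getD j 0)

-- one of A's two identical double loops building 'result' / 'secondResult'
def aTransform (xs : List Int) : List Int :=
  (List.range (xs.length - 1)).foldl (fun res i =>
    (List.range (xs.length - i - 1)).foldl (fun res j =>
      res ++ [aInnerMax xs j (i + j)]) res) []

def TransformTransform (A : List Int) (N : Int) : Bool :=
  let result := aTransform A
  let secondResult := aTransform result
  let summ := (List.range secondResult.length).foldl
      (fun s y => s + secondResult.getD y 0) 0
  PySem.Int.mod summ 2 == 0

-- ===== PORT B =====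
-- running maximum update: 'running = v if running is None or v > running else running'
def bUpd (o : Option Int) (v : Int) : Option Int :=
  match o with
  | none => some v
  | some r => some (if v > r then v else r)

-- pm[k] = max(xs[:k]) (None for k = 0), built in one pass
def bPrefixMax (xs : List Int) : List (Option Int) :=
  (xs.foldl (fun st v =>
      let running := bUpd st.2 v
      (st.1 ++ [running], running)) (([none] : List (Option Int)), (none : Option Int))).1

-- 'p if p is not None and p > v else v'
def bElem (xs : List Int) (pm : List (Option Int)) (j k : Nat) : Int :=
  let v := xs.getD j 0
  match pm.getD k none with
  | none => v
  | some p => if p > v then p else v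

def bTransform (xs : List Int) : List Int :=
  let pm := bPrefixMax xs
  (List.range (xs.length - 1)).foldl (fun res i =>
    (List.range (xs.length - i - 1)).foldl (fun res j =>
      res ++ [bElem xs pm j (i + j)]) res) []

def TransformTransform_alt (A : List Int) (N : Int) : Bool :=
  PySem.Int.mod ((bTransform (bTransform A)).foldl (· + ·) 0) 2 == 0

-- ===== PRECONDITION & SPEC =====
def Spec_TransformTransform (A : List Int) (N : Int) (out : Bool) : Prop := out = TransformTransform_alt A N
instance (A : List Int) (N : Int) (out : Bool) : Decidable (Spec_TransformTransform A N out) := by unfold Spec_TransformTransform; infer_instance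

-- ===== CLAIM (what is proved, stated in full; the proofs are below) =====
def Claim_equal_TransformTransform : Prop := ∀ (A : List Int) (N : Int), Dom_TransformTransform A N → Spec_TransformTransform A N (TransformTransform A N)

-- ===== LEMMAS AND PROOFS =====

-- A's inner index loop is a fold of the step over the prefix take k
theorem aInnerMax_take (xs : List Int) (j k : Nat) (hk : k ≤ xs.length) :
    aInnerMax xs j k =
      (xs.take k).foldl (fun mx w => if w > mx then w else mx) (xs.getD j 0) := by
  unfold aInnerMax
  generalize xs.getD j 0 = v
  induction k generalizing v with
  | zero => simp
  | succ k ih =>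
    rw [List.range_succ, List.foldl_append,
        List.take_succ, List.foldl_append, ih (Nat.le_of_succ_le hk)]
    have h : xs[k]? = some (xs.getD k 0) := by
      rw [List.getD_eq_getElem _ _ (by omega)]
      exact List.getElem?_eq_getElem (by omega)
    rw [h]
    rfl

-- collapse an option-valued running max onto a seed
def m2 (o : Option Int) (v : Int) : Int :=
  match o with
  | none => v
  | some p => if p > v then p else v

theorem m2_foldl (l : List Int) (o : Option Int) (v : Int) :
    m2 (l.foldl bUpd o) v = l.foldl (fun mx w => if w > mx then w else mx) (m2 o v) := by
  induction l generalizing o v with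
  | nil => rfl
  | cons w t ih =>
    simp only [List.foldl_cons]
    rw [ih]
    congr 1
    cases o with
    | none => rfl
    | some p => simp only [bUpd, m2]; split_ifs <;> omega

-- the scan of running maxima along a list
def scanMax (r : Option Int) : List Int → List (Option Int)
  | [] => []
  | v :: t => bUpd r v :: scanMax (bUpd r v) t

theorem bPrefixMax_fold (l : List Int) (acc : List (Option Int)) (r : Option Int) :
    (l.foldl (fun st v =>
        let running := bUpd st.2 v
        (st.1 ++ [running], running)) (acc, r)).1 = acc ++ scanMax r l := by
  induction l generalizing acc r with
  | nil => simp [scanMax]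
  | cons v t ih => simp [scanMax, ih]

theorem bPrefixMax_eq (xs : List Int) : bPrefixMax xs = none :: scanMax none xs := by
  unfold bPrefixMax; rw [bPrefixMax_fold]; rfl

theorem scanMax_get (xs : List Int) (r : Option Int) (k : Nat) (hk : k ≤ xs.length) :
    (r :: scanMax r xs).getD k none = (xs.take k).foldl bUpd r := by
  induction xs generalizing r k with
  | nil =>
    have hz : k = 0 := by simpa using hk
    subst hz; rfl
  | cons v t ih =>
    cases k with
    | zero => simp
    | succ k =>
      simp only [scanMax, List.take_succ_cons, List.foldl_cons, List.getD_cons_succ]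
      exact ih (bUpd r v) k (by simpa using hk)

-- keystone: the two element computations agree whenever k is in range
theorem elem_eq (xs : List Int) (j k : Nat) (hk : k ≤ xs.length) :
    bElem xs (bPrefixMax xs) j k = aInnerMax xs j k := by
  have h1 : bElem xs (bPrefixMax xs) j k
      = m2 ((xs.take k).foldl bUpd none) (xs.getD j 0) := by
    unfold bElem
    rw [bPrefixMax_eq, scanMax_get xs none k hk]
    rfl
  rw [h1, m2_foldl, aInnerMax_take xs j k hk]
  rfl

theorem transform_eq (xs : List Int) : aTransform xs = bTransform xs := by
  unfold aTransform bTransform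
  apply PySem.List.foldl_congr_mem
  intro res i hi
  apply PySem.List.foldl_congr_mem
  intro res' j hj
  rw [List.mem_range] at hi hj
  rw [elem_eq xs j (i + j) (by omega)]

-- A's indexed summation loop is a plain left fold over the list
theorem sum_idx (xs : List Int) (k : Nat) (hk : k ≤ xs.length) (init : Int) :
    (List.range k).foldl (fun s y => s + xs.getD y 0) init =
      (xs.take k).foldl (· + ·) init := by
  induction k generalizing init with
  | zero => simp
  | succ k ih =>
    rw [List.range_succ, List.foldl_append, List.take_succ, List.foldl_append,
        ih (Nat.le_of_succ_le hk)]
    have h : xs[k]? = some (xs.getD k 0) := by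
      rw [List.getD_eq_getElem _ _ (by omega)]
      exact List.getElem?_eq_getElem (by omega)
    rw [h]
    rfl

-- ===== VERDICT (by name: the statement is the Claim_ definition above) =====
theorem TransformTransform_spec : Claim_equal_TransformTransform := by
  intro A N _
  unfold Spec_TransformTransform TransformTransform TransformTransform_alt
  simp only [transform_eq]
  rw [sum_idx _ _ (Nat.le_refl _) 0, List.take_length]
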